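-- pv_equiv track=rewrite | github.com/AOMLDrifterTeam/DrifterDataAutomation | SIO_020.py | find_iridium_details
-- ===== SOURCE A (Python) =====
-- def find_iridium_details(lines):
--     iridium_transmit_duration = "NA"
--     iridium_retries = "NA"
--     found_iridium_line = False
--     equation_count = 0
--
--     for line in lines:
--         # Check if the line contains all three necessary words
--         if "Iridium" in line and "transmit" in line and "duration" in line:
--             found_iridium_line = True
--             continue
--
--         if found_iridium_line and "Equation" in line:
--
--             equation_count += 1
--             if equation_count == 1:
--                 iridium_transmit_duration = line.strip()  # First "Equation" line
--
--             elif equation_count == 2: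
--                 iridium_retries = line.strip()  # Second "Equation" line
--                 break  # Break after finding both needed values
--
--     return iridium_transmit_duration, iridium_retries
-- ===== SOURCE B (Python) =====
-- def find_iridium_details(lines):
--     def is_marker(l):
--         return "Iridium" in l and "transmit" in l and "duration" in l
--
--     markers = [i for i, l in enumerate(lines) if is_marker(l)]
--     if not markers:
--         return "NA", "NA"
--     m = markers[0]
--     eqs = [l.strip() for i, l in enumerate(lines)
--            if i > m and not is_marker(l) and "Equation" in l]
--     eqs += ["NA", "NA"]
--     return eqs[0], eqs[1]
-- ===== Notes on version B (the rewrite author's own statement) =====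
-- stated objective: alternative
-- what changed: B replaces A's single stateful loop (flag, counter, break) by index arithmetic over two full comprehension passes: it builds the list of marker-line indices, then filters the enumerated lines by index > first marker index to collect the stripped Equation lines, padding with 'NA'.
import Mathlib
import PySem

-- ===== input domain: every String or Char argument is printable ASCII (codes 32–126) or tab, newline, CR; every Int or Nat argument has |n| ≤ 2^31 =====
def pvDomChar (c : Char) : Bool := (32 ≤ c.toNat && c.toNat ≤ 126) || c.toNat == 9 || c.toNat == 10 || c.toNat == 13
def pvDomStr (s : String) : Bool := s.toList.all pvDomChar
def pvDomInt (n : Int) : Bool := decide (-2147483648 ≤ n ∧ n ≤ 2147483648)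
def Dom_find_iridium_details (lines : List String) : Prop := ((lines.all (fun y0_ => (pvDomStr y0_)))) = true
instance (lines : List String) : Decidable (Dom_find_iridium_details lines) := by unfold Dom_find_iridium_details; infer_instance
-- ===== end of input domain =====

-- B replaces A's stateful flag/counter/break loop by index arithmetic over two full comprehension passes (marker indices, then Equation lines filtered by index); same values, no speed claim.


-- ===== PORT A =====
-- the marker test, the same expression in both Pythons: "Iridium" in line and "transmit" in line and "duration" in line
def pvMarker (line : String) : Bool :=
  PySem.Str.isIn "Iridium" line && PySem.Str.isIn "transmit" line && PySem.Str.isIn "duration" line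

-- A's loop, state = (iridium_transmit_duration, iridium_retries, found_iridium_line, equation_count)
def findIridiumLoopA : List String → String → String → Bool → Nat → String × String
  | [], dur, ret, _, _ => (dur, ret)
  | line :: rest, dur, ret, found, count =>
    if pvMarker line then findIridiumLoopA rest dur ret true count
    else if found && PySem.Str.isIn "Equation" line then
      if count + 1 = 1 then findIridiumLoopA rest (PySem.Str.strip line) ret found (count + 1)
      else if count + 1 = 2 then (dur, PySem.Str.strip line)  -- break
      else findIridiumLoopA rest dur ret found (count + 1)
    else findIridiumLoopA rest dur ret found count

def find_iridium_details (lines : List String) : String × String :=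
  findIridiumLoopA lines "NA" "NA" false 0

-- ===== PORT B =====
-- [i for i, l in enumerate(lines) if is_marker(l)], with the enumeration started at s
def pvMarkersFrom (s : Int) (xs : List String) : List Int :=
  (PySem.List.enumerate xs s).filterMap (fun p => if pvMarker p.2 then some p.1 else none)

-- [l.strip() for i, l in enumerate(lines) if i > m and not is_marker(l) and "Equation" in l]
def pvEqsFrom (m s : Int) (xs : List String) : List String :=
  (PySem.List.enumerate xs s).filterMap (fun p =>
    if decide (m < p.1) && !pvMarker p.2 && PySem.Str.isIn "Equation" p.2
    then some (PySem.Str.strip p.2) else none)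

def find_iridium_details_alt (lines : List String) : String × String :=
  match pvMarkersFrom 0 lines with
  | [] => ("NA", "NA")
  | m :: _ =>
    let eqs := pvEqsFrom m 0 lines ++ ["NA", "NA"]
    (eqs.getD 0 "NA", eqs.getD 1 "NA")

-- ===== PRECONDITION & SPEC =====
def Spec_find_iridium_details (lines : List String) (out : String × String) : Prop := out = find_iridium_details_alt lines
instance (lines : List String) (out : String × String) : Decidable (Spec_find_iridium_details lines out) := by unfold Spec_find_iridium_details; infer_instance

-- ===== CLAIM (what is proved, stated in full; the proofs are below) =====
def Claim_equal_find_iridium_details : Prop := ∀ (lines : List String), Dom_find_iridium_details lines → Spec_find_iridium_details lines (find_iridium_details lines)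

-- ===== LEMMAS AND PROOFS =====

-- the non-marker Equation lines of xs, stripped (what B's second pass collects past the marker index)
def pvCollectAll : List String → List String
  | [] => []
  | l :: rest =>
    if pvMarker l then pvCollectAll rest
    else if PySem.Str.isIn "Equation" l then PySem.Str.strip l :: pvCollectAll rest
    else pvCollectAll rest

theorem markersFrom_nil (s : Int) : pvMarkersFrom s [] = [] := by
  simp [pvMarkersFrom, PySem.List.enumerate_nil]

theorem markersFrom_cons (s : Int) (l : String) (xs : List String) :
    pvMarkersFrom s (l :: xs) =
      if pvMarker l then s :: pvMarkersFrom (s + 1) xs else pvMarkersFrom (s + 1) xs := by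
  simp [pvMarkersFrom, PySem.List.enumerate_cons]
  split_ifs with h <;> simp [h]

theorem markersFrom_head_ge (xs : List String) :
    ∀ (s m : Int) (ms : List Int), pvMarkersFrom s xs = m :: ms → s ≤ m := by
  induction xs with
  | nil => intro s m ms h; simp [markersFrom_nil] at h
  | cons l rest ih =>
    intro s m ms h
    rw [markersFrom_cons] at h
    split_ifs at h with hm
    · simp only [List.cons.injEq] at h
      omega
    · have := ih (s + 1) m ms h; omega

theorem eqsFrom_cons (m s : Int) (l : String) (xs : List String) :
    pvEqsFrom m s (l :: xs) =
      (if decide (m < s) && !pvMarker l && PySem.Str.isIn "Equation" l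
       then [PySem.Str.strip l] else []) ++ pvEqsFrom m (s + 1) xs := by
  simp [pvEqsFrom, PySem.List.enumerate_cons]
  split_ifs with h <;> simp [h]

theorem eqsFrom_past (m : Int) (xs : List String) :
    ∀ s : Int, m < s → pvEqsFrom m s xs = pvCollectAll xs := by
  induction xs with
  | nil => intro s _; simp [pvEqsFrom, PySem.List.enumerate_nil, pvCollectAll]
  | cons l rest ih =>
    intro s hs
    rw [eqsFrom_cons, ih (s + 1) (by omega)]
    have hd : decide (m < s) = true := by simpa using hs
    by_cases hm : pvMarker l
    · simp [pvCollectAll, hd, hm]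
    · by_cases he : PySem.Chars.isIn ['E', 'q', 'u', 'a', 't', 'i', 'o', 'n'] l.toList
      · simp [pvCollectAll, hd, hm, he]
      · simp [pvCollectAll, hd, hm, he]

-- A's loop with found = true and count = 1: the second slot is the next collected Equation line, if any
theorem loopA_count_one (xs : List String) (d : String) :
    findIridiumLoopA xs d "NA" true 1 = (d, (pvCollectAll xs).getD 0 "NA") := by
  induction xs with
  | nil => simp [findIridiumLoopA, pvCollectAll]
  | cons l rest ih =>
    by_cases hm : pvMarker l
    · simp [findIridiumLoopA, pvCollectAll, hm, ih]
    · by_cases he : PySem.Chars.isIn ['E', 'q', 'u', 'a', 't', 'i', 'o', 'n'] l.toList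
      · simp [findIridiumLoopA, pvCollectAll, hm, he]
      · simp [findIridiumLoopA, pvCollectAll, hm, he, ih]

-- A's loop with found = true and count = 0 returns the first two collected Equation lines
theorem loopA_count_zero (xs : List String) :
    findIridiumLoopA xs "NA" "NA" true 0 =
      ((pvCollectAll xs ++ ["NA", "NA"]).getD 0 "NA",
       (pvCollectAll xs ++ ["NA", "NA"]).getD 1 "NA") := by
  induction xs with
  | nil => simp [findIridiumLoopA, pvCollectAll]
  | cons l rest ih =>
    by_cases hm : pvMarker l
    · simp [findIridiumLoopA, pvCollectAll, hm, ih]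
    · by_cases he : PySem.Chars.isIn ['E', 'q', 'u', 'a', 't', 'i', 'o', 'n'] l.toList
      · simp [findIridiumLoopA, pvCollectAll, hm, he, loopA_count_one]
        cases h1 : pvCollectAll rest with
        | nil => simp
        | cons a t => simp
      · simp [findIridiumLoopA, pvCollectAll, hm, he, ih]

-- A's search phase equals B's index-filtered form, for any enumeration start s
theorem loopA_search (xs : List String) :
    ∀ s : Int, findIridiumLoopA xs "NA" "NA" false 0 =
      (match pvMarkersFrom s xs with
       | [] => ("NA", "NA")
       | m :: _ =>
         ((pvEqsFrom m s xs ++ ["NA", "NA"]).getD 0 "NA",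
          (pvEqsFrom m s xs ++ ["NA", "NA"]).getD 1 "NA")) := by
  induction xs with
  | nil => intro s; simp [findIridiumLoopA, markersFrom_nil]
  | cons l rest ih =>
    intro s
    by_cases hm : pvMarker l
    · rw [markersFrom_cons, if_pos hm]
      dsimp only
      rw [eqsFrom_cons, eqsFrom_past s rest (s + 1) (by omega)]
      simp [findIridiumLoopA, hm, loopA_count_zero]
    · rw [markersFrom_cons, if_neg hm]
      have hA : findIridiumLoopA (l :: rest) "NA" "NA" false 0 =
          findIridiumLoopA rest "NA" "NA" false 0 := by
        simp [findIridiumLoopA, hm]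
      rw [hA, ih (s + 1)]
      cases hms : pvMarkersFrom (s + 1) rest with
      | nil => rfl
      | cons m ms =>
        have hge : s + 1 ≤ m := markersFrom_head_ge rest (s + 1) m ms hms
        dsimp only
        rw [eqsFrom_cons]
        have hd : decide (m < s) = false := by simp; omega
        simp [hd]

-- ===== VERDICT (by name: the statement is the Claim_ definition above) =====
theorem find_iridium_details_spec : Claim_equal_find_iridium_details := by
  intro lines _
  unfold Spec_find_iridium_details find_iridium_details find_iridium_details_alt
  rw [loopA_search lines 0]
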